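-- pv_equiv track=rewrite | github.com/ThomasParistech/adventofcode | solutions/day_08_bis.py | try_and_translate
-- ===== SOURCE A (Python) =====
-- from typing import List, Set, Tuple
-- import copy
--
-- def sort_str(s) -> str:
--     return "".join(sorted(s))
--
-- def try_and_translate(list_str: List[str], word_code: str):
--     tmp_list = copy.deepcopy(list_str)
--     assert len(word_code) == 7
--     for idx, s in enumerate(list_str):
--         for old, new in zip("abcdefg", word_code):
--             s = s.replace(old, new.upper())
--         tmp_list[idx] = sort_str(s.lower())
--
--     return tmp_list
-- ===== SOURCE B (Python) =====
-- from typing import List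
--
--
-- def sort_str(s) -> str:
--     return "".join(sorted(s))
--
--
-- def try_and_translate(list_str: List[str], word_code: str):
--     assert len(word_code) == 7
--     table = dict(zip("abcdefg", word_code))
--     return [sort_str("".join(table.get(c, c) for c in s).lower()) for s in list_str]
-- ===== Notes on version B (the rewrite author's own statement) =====
-- stated objective: idiomatic
-- what changed: Replaces the seven sequential full-string str.replace passes (with an uppercase-sentinel trick to avoid re-substitution) by one dict built from zip('abcdefg', word_code) and a single table-driven pass per string; the result list is built directly instead of deep-copying and overwriting list_str.
import Mathlib
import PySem

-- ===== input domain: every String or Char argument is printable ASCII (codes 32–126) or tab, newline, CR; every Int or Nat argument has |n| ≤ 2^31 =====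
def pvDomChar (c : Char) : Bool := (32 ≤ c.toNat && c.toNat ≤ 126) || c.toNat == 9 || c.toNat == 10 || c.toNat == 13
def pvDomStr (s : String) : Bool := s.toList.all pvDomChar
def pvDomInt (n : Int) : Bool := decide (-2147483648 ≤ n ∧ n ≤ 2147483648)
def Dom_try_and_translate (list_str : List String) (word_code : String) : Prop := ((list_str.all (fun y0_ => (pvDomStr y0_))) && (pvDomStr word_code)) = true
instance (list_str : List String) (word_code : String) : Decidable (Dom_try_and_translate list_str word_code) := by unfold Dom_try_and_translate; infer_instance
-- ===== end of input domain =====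

-- B replaces A's seven sequential str.replace passes by one zip-built table and a single
-- pass per string (idiomatic; return value only — A deep-copies, neither mutates list_str).

-- ===== PORT A =====
-- sort_str(s) = "".join(sorted(s))
def pv_sort_str (s : String) : String :=
  String.ofList (PySem.List.sorted s.toList (fun c => c) false)

def try_and_translate (list_str : List String) (word_code : String) : List String :=
  list_str.map (fun s =>
    let s' := (List.zip "abcdefg".toList word_code.toList).foldl
      (fun t p => PySem.Str.replace t (String.ofList [p.1]) (String.ofList [PySem.Chars.upperChar p.2])) s
    pv_sort_str (PySem.Str.lower s'))

-- ===== PORT B =====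
def try_and_translate_alt (list_str : List String) (word_code : String) : List String :=
  let table : PySem.Dict Char Char :=
    (List.zip "abcdefg".toList word_code.toList).foldl (fun d p => d.insert p.1 p.2) PySem.Dict.empty
  list_str.map (fun s =>
    pv_sort_str (PySem.Str.lower (String.ofList (s.toList.map (fun c => table.getD c c)))))

-- ===== PRECONDITION & SPEC =====
-- A asserts len(word_code) == 7 and raises AssertionError otherwise; Pre_ excludes exactly those inputs.
def Pre_try_and_translate (list_str : List String) (word_code : String) : Prop :=
  word_code.toList.length = 7
instance (list_str : List String) (word_code : String) : Decidable (Pre_try_and_translate list_str word_code) := by unfold Pre_try_and_translate; infer_instance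

def pvWitness_try_and_translate : List String × String := (["cafe 12", "bad!"], "gfedcba")

def Spec_try_and_translate (list_str : List String) (word_code : String) (out : List String) : Prop := out = try_and_translate_alt list_str word_code
instance (list_str : List String) (word_code : String) (out : List String) : Decidable (Spec_try_and_translate list_str word_code out) := by unfold Spec_try_and_translate; infer_instance

-- ===== CLAIM (what is proved, stated in full; the proofs are below) =====
def Claim_equal_try_and_translate : Prop := ∀ (list_str : List String) (word_code : String), Dom_try_and_translate list_str word_code → Pre_try_and_translate list_str word_code → Spec_try_and_translate list_str word_code (try_and_translate list_str word_code)

-- ===== LEMMAS AND PROOFS =====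

theorem toNat_upperChar (w : Char) :
    (PySem.Chars.upperChar w).toNat = if 97 ≤ w.toNat ∧ w.toNat ≤ 122 then w.toNat - 32 else w.toNat := by
  unfold PySem.Chars.upperChar PySem.Chars.islower
  have e1 : ('a'.val.toNat) = 97 := rfl
  have e2 : ('z'.val.toNat) = 122 := rfl
  have e3 : ∀ x : Char, x.val.toNat = x.toNat := fun _ => rfl
  simp only [Char.le_def, UInt32.le_iff_toNat_le, Bool.and_eq_true, decide_eq_true_eq, e1, e2, e3]
  split
  · rename_i h
    have hval : Nat.isValidChar (w.toNat - 32) := by left; omega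
    rw [Char.toNat_ofNat, if_pos hval]
  · rfl

theorem toNat_lowerChar (w : Char) :
    (PySem.Chars.lowerChar w).toNat = if 65 ≤ w.toNat ∧ w.toNat ≤ 90 then w.toNat + 32 else w.toNat := by
  unfold PySem.Chars.lowerChar PySem.Chars.isupper
  have e1 : ('A'.val.toNat) = 65 := rfl
  have e2 : ('Z'.val.toNat) = 90 := rfl
  have e3 : ∀ x : Char, x.val.toNat = x.toNat := fun _ => rfl
  simp only [Char.le_def, UInt32.le_iff_toNat_le, Bool.and_eq_true, decide_eq_true_eq, e1, e2, e3]
  split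
  · rename_i h
    have hval : Nat.isValidChar (w.toNat + 32) := by left; omega
    rw [Char.toNat_ofNat, if_pos hval]
  · rfl

theorem char_eq_of_toNat (a b : Char) (h : a.toNat = b.toNat) : a = b :=
  Char.ext (UInt32.toNat_inj.mp h)

-- the uppercase sentinel never collides with a lowercase pattern letter
theorem upperChar_ne (w c : Char) (h1 : 97 ≤ c.toNat) (h2 : c.toNat ≤ 122) : PySem.Chars.upperChar w ≠ c := by
  intro heq
  have := congrArg Char.toNat heq
  rw [toNat_upperChar] at this
  split at this <;> omega

theorem lowerChar_upperChar (w : Char) : PySem.Chars.lowerChar (PySem.Chars.upperChar w) = PySem.Chars.lowerChar w := by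
  apply char_eq_of_toNat
  rw [toNat_lowerChar, toNat_lowerChar, toNat_upperChar]
  split_ifs <;> omega

theorem replace_go_single (o n : Char) : ∀ (l : List Char) (fuel : Nat) (acc : List Char), l.length ≤ fuel →
    PySem.Chars.replace.go [o] [n] fuel l acc
      = acc.reverse ++ l.map (fun c => if c = o then n else c) := by
  intro l
  induction l with
  | nil => intro fuel acc _; cases fuel <;> simp [PySem.Chars.replace.go]
  | cons c t ih =>
    intro fuel acc hle
    cases fuel with
    | zero => simp at hle
    | succ f =>
      rw [PySem.Chars.replace.go]
      by_cases hc : c = o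
      · rw [if_pos (by simp [List.isPrefixOf, hc])]
        rw [show List.drop [o].length (c :: t) = t from rfl]
        rw [ih f ([n].reverse ++ acc) (by simpa using hle)]
        simp [hc]
      · rw [if_neg (by simp [List.isPrefixOf]; exact Ne.symm hc)]
        rw [ih f (c :: acc) (by simpa using hle)]
        simp [hc]

-- s.replace(old, new) with a one-char pattern is a character map
theorem replace_single (cs : List Char) (o n : Char) :
    PySem.Chars.replace cs [o] [n] = cs.map (fun c => if c = o then n else c) := by
  rw [PySem.Chars.replace]
  simp only [List.isEmpty]
  rw [replace_go_single o n cs cs.length [] le_rfl]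
  simp

def chainStep (a : Char) (p : Char × Char) : Char := if a = p.1 then PySem.Chars.upperChar p.2 else a

def chainA (ps : List (Char × Char)) (c : Char) : Char := ps.foldl chainStep c

def lookupD (ps : List (Char × Char)) (c : Char) : Char :=
  (ps.foldl (fun d p => d.insert p.1 p.2) PySem.Dict.empty).getD c c

theorem foldl_strreplace_toList (ps : List (Char × Char)) (s : String) :
    (ps.foldl (fun t p => PySem.Str.replace t (String.ofList [p.1]) (String.ofList [PySem.Chars.upperChar p.2])) s).toList
      = ps.foldl (fun t p => PySem.Chars.replace t [p.1] [PySem.Chars.upperChar p.2]) s.toList := by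
  induction ps generalizing s with
  | nil => rfl
  | cons p rest ih =>
    simp only [List.foldl_cons]
    rw [ih, PySem.Str.toList_replace, String.toList_ofList, String.toList_ofList]

theorem foldl_creplace_map (ps : List (Char × Char)) (cs : List Char) :
    ps.foldl (fun t p => PySem.Chars.replace t [p.1] [PySem.Chars.upperChar p.2]) cs
      = cs.map (chainA ps) := by
  induction ps generalizing cs with
  | nil =>
    simp only [List.foldl_nil]
    have h : cs.map (chainA []) = cs.map id := List.map_congr_left (fun a _ => rfl)
    rw [h, List.map_id]
  | cons p rest ih =>
    simp only [List.foldl_cons]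
    rw [replace_single, ih, List.map_map]
    rfl

theorem chainA_of_not_mem (qs : List (Char × Char)) (c : Char) (h : ∀ q ∈ qs, c ≠ q.1) :
    chainA qs c = c := by
  induction qs with
  | nil => rfl
  | cons q rest ih =>
    unfold chainA
    simp only [List.foldl_cons]
    rw [show chainStep c q = c from if_neg (h q (by simp))]
    exact ih (fun q hq => h q (by simp [hq]))

theorem chainA_cases (qs : List (Char × Char)) : ∀ c : Char,
    chainA qs c = c ∨ ∃ q ∈ qs, chainA qs c = PySem.Chars.upperChar q.2 := by
  induction qs with
  | nil => intro c; exact Or.inl rfl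
  | cons q rest ih =>
    intro c
    unfold chainA
    simp only [List.foldl_cons]
    by_cases hc : c = q.1
    · rw [show chainStep c q = PySem.Chars.upperChar q.2 from if_pos hc]
      rcases ih (PySem.Chars.upperChar q.2) with h | ⟨q', hq', h⟩
      · exact Or.inr ⟨q, by simp, h⟩
      · exact Or.inr ⟨q', by simp [hq'], h⟩
    · rw [show chainStep c q = c from if_neg hc]
      rcases ih c with h | ⟨q', hq', h⟩
      · exact Or.inl h
      · exact Or.inr ⟨q', by simp [hq'], h⟩

theorem lookupD_append (qs : List (Char × Char)) (p : Char × Char) (c : Char) :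
    lookupD (qs ++ [p]) c = if c = p.1 then p.2 else lookupD qs c := by
  unfold lookupD
  rw [List.foldl_append]
  simp [PySem.Dict.getD_insert]

theorem point_eq (ps : List (Char × Char))
    (hk : ∀ p ∈ ps, 97 ≤ p.1.toNat ∧ p.1.toNat ≤ 122)
    (hnd : (ps.map Prod.fst).Nodup) (c : Char) :
    PySem.Chars.lowerChar (chainA ps c) = PySem.Chars.lowerChar (lookupD ps c) := by
  induction ps using List.reverseRecOn with
  | nil =>
    have h : lookupD [] c = c := by
      simp [lookupD, PySem.Dict.getD, PySem.Dict.empty, PySem.Dict.get?]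
    rw [h]
    rfl
  | append_singleton qs p ih =>
    rw [List.map_append] at hnd
    have hnd' : (qs.map Prod.fst).Nodup := (List.nodup_append.mp hnd).1
    have hp1 : p.1 ∉ qs.map Prod.fst := by
      have := (List.nodup_append.mp hnd).2.2
      intro hmem
      exact this p.1 hmem p.1 (List.mem_singleton_self p.1) rfl
    have hkq : ∀ q ∈ qs, 97 ≤ q.1.toNat ∧ q.1.toNat ≤ 122 :=
      fun q hq => hk q (by simp [hq])
    have hkp := hk p (by simp)
    have hchain : chainA (qs ++ [p]) c = chainStep (chainA qs c) p := by
      unfold chainA; rw [List.foldl_append]; rfl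
    rw [hchain, lookupD_append]
    by_cases hc : c = p.1
    · have h0 : chainA qs c = c := by
        apply chainA_of_not_mem
        intro q hq he
        exact hp1 (by rw [hc] at he; rw [he]; exact List.mem_map_of_mem hq)
      rw [if_pos hc, h0, show chainStep c p = PySem.Chars.upperChar p.2 from if_pos hc]
      exact lowerChar_upperChar p.2
    · have hne : chainA qs c ≠ p.1 := by
        rcases chainA_cases qs c with h | ⟨q, _, h⟩
        · rw [h]; exact hc
        · rw [h]; exact upperChar_ne q.2 p.1 hkp.1 hkp.2
      rw [if_neg hc, show chainStep (chainA qs c) p = chainA qs c from if_neg hne]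
      exact ih hkq hnd'

theorem map_fst_zip_take (as : List Char) (bs : List Char) :
    (List.zip as bs).map Prod.fst = as.take bs.length := by
  induction as generalizing bs with
  | nil => simp
  | cons a as ih =>
    cases bs with
    | nil => simp
    | cons b bs => simp [ih]

theorem pv_sort_str_congr (x y : String) (h : x.toList = y.toList) : pv_sort_str x = pv_sort_str y := by
  unfold pv_sort_str
  rw [h]

theorem per_string (word_code : String) (s : String) :
    pv_sort_str (PySem.Str.lower ((List.zip "abcdefg".toList word_code.toList).foldl
        (fun t p => PySem.Str.replace t (String.ofList [p.1]) (String.ofList [PySem.Chars.upperChar p.2])) s))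
    = pv_sort_str (PySem.Str.lower (String.ofList (s.toList.map (fun c =>
        ((List.zip "abcdefg".toList word_code.toList).foldl
          (fun d p => d.insert p.1 p.2) PySem.Dict.empty).getD c c)))) := by
  have habc : "abcdefg".toList = ['a','b','c','d','e','f','g'] := by simp
  set ps := List.zip "abcdefg".toList word_code.toList with hps
  have hk : ∀ p ∈ ps, 97 ≤ p.1.toNat ∧ p.1.toNat ≤ 122 := by
    intro p hp
    have h1 : p.1 ∈ "abcdefg".toList := (List.of_mem_zip hp).1
    rw [habc] at h1
    have hall : ∀ c ∈ ['a','b','c','d','e','f','g'], 97 ≤ c.toNat ∧ c.toNat ≤ 122 := by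
      intro c hc; fin_cases hc <;> exact ⟨Nat.le_of_sub_eq_zero rfl, Nat.le_of_sub_eq_zero rfl⟩
    exact hall p.1 h1
  have hnd : (ps.map Prod.fst).Nodup := by
    rw [hps, map_fst_zip_take, habc]
    exact (List.take_sublist _ _).nodup (by simp)
  apply pv_sort_str_congr
  rw [PySem.Str.toList_lower, PySem.Str.toList_lower]
  simp only [PySem.Chars.lower]
  rw [foldl_strreplace_toList, foldl_creplace_map, String.toList_ofList]
  rw [List.map_map, List.map_map]
  exact List.map_congr_left (fun c _ => point_eq ps hk hnd c)

-- ===== VERDICT (by name: the statement is the Claim_ definition above) =====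
theorem try_and_translate_spec : Claim_equal_try_and_translate := by
  intro list_str word_code _ _
  unfold Spec_try_and_translate try_and_translate try_and_translate_alt
  apply List.map_congr_left
  intro s _
  exact per_string word_code s
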